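-- pv_equiv track=rewrite | github.com/ElchaabiMohamed/InferCode_SVM | NC-5690-python-files/program_4388.py | prononocable
-- ===== SOURCE A (Python) =====
-- def prononocable(mot):
--     consonne=True
--     cpt=0
--     i=0
--     while cpt<=3 and i<len(mot):
--         if mot[i] in 'aeiouy':    #on observe une voyelle
--             if consonne :
--                 consonne=False
--                 cpt=1         #on débute une nouvelle séquence de voyelles
--             else:
--                 cpt+=1        #on poursuit la séquence de voyelles
--         else: #on suppose qu'une non voyelle est une consonne
--             if consonne:
--                 cpt+=1        #on poursuit une séquence de consonnes
--             else:
--                 consonne=True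
--                 cpt=1         #on débute une nouvelle séquence de consonnes
--         i+=1
--     return cpt<=3
-- ===== SOURCE B (Python) =====
-- def prononocable(mot):
--     s = ''.join('V' if c in 'aeiouy' else 'C' for c in mot)
--     return 'VVVV' not in s and 'CCCC' not in s
-- ===== Notes on version B (the rewrite author's own statement) =====
-- stated objective: simpler
-- what changed: Replaces the manual run-length state machine (flag + counter + early exit) with a transform of each character to 'V'/'C' followed by two substring-membership tests.
import Mathlib
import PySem

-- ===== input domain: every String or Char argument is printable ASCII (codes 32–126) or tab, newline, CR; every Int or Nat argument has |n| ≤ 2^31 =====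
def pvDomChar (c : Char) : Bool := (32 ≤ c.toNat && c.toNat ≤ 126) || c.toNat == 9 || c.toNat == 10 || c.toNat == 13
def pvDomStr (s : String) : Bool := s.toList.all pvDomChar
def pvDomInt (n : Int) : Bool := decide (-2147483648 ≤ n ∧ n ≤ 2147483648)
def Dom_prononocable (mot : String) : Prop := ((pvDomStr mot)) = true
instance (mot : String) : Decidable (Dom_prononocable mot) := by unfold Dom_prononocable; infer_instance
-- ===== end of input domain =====

-- B replaces A's manual run-length state machine with a map-to-'V'/'C' transform
-- followed by two substring-membership tests (objective: simpler).


-- ===== PORT A =====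
-- A's while loop as structural recursion over the remaining characters with the
-- same state (consonne, cpt); the guard `cpt <= 3` is checked before each step.
def pvALoop : List Char → Bool → Int → Int
  | [], _, cpt => cpt
  | c :: rest, consonne, cpt =>
    if cpt ≤ 3 then
      if PySem.Chars.isIn [c] "aeiouy".toList then
        if consonne then pvALoop rest false 1
        else pvALoop rest false (cpt + 1)
      else
        if consonne then pvALoop rest true (cpt + 1)
        else pvALoop rest true 1
    else cpt

def prononocable (mot : String) : Bool :=
  decide (pvALoop mot.toList true 0 ≤ 3)

-- ===== PORT B =====
-- the mapping of B's comprehension: 'V' if c in 'aeiouy' else 'C'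
def pvTyp (c : Char) : Char :=
  if PySem.Chars.isIn [c] "aeiouy".toList then 'V' else 'C'

def prononocable_alt (mot : String) : Bool :=
  let s : List Char := mot.toList.map pvTyp
  !(PySem.Chars.isIn "VVVV".toList s) && !(PySem.Chars.isIn "CCCC".toList s)

-- ===== PRECONDITION & SPEC =====
def Spec_prononocable (mot : String) (out : Bool) : Prop := out = prononocable_alt mot
instance (mot : String) (out : Bool) : Decidable (Spec_prononocable mot out) := by unfold Spec_prononocable; infer_instance

-- ===== CLAIM (what is proved, stated in full; the proofs are below) =====
def Claim_equal_prononocable : Prop := ∀ (mot : String), Dom_prononocable mot → Spec_prononocable mot (prononocable mot)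

-- ===== LEMMAS AND PROOFS =====

-- "some run of four equal type-characters occurs"
def Run4 (s : List Char) : Prop :=
  (List.replicate 4 'V') <:+: s ∨ (List.replicate 4 'C') <:+: s

lemma tw_cons {b c : Char} (s : List Char) :
    List.takeWhile (fun x => x == b) (c :: s) =
      if c = b then c :: List.takeWhile (fun x => x == b) s else [] := by
  by_cases h : c = b <;> simp [h]

lemma replicate_prefix_iff_takeWhile {b : Char} {s : List Char} (k : Nat) :
    List.replicate k b <+: s ↔ k ≤ (s.takeWhile (fun x => x == b)).length := by
  induction s generalizing k with
  | nil => cases k <;> simp [List.replicate]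
  | cons c rest ih =>
      cases k with
      | zero => simp
      | succ n =>
        rw [List.replicate_succ, List.cons_prefix_cons, tw_cons]
        by_cases hc : c = b
        · subst hc
          simp [ih n]
        · rw [if_neg hc]
          simp only [List.length_nil]
          constructor
          · rintro ⟨h, -⟩
            exact absurd h.symm hc
          · intro h
            exact absurd h (by omega)

lemma replicate_four_prefix_cons {x b : Char} {s : List Char} :
    List.replicate 4 x <+: b :: s ↔
      x = b ∧ 3 ≤ (s.takeWhile (fun y => y == x)).length := by
  rw [show (4 : Nat) = 3 + 1 from rfl, List.replicate_succ, List.cons_prefix_cons,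
      replicate_prefix_iff_takeWhile 3]

lemma run4_cons {b : Char} (hb : b = 'V' ∨ b = 'C') (s : List Char) :
    Run4 (b :: s) ↔ Run4 s ∨ 3 ≤ (s.takeWhile (fun x => x == b)).length := by
  unfold Run4
  rw [List.infix_cons_iff, List.infix_cons_iff,
      replicate_four_prefix_cons, replicate_four_prefix_cons]
  rcases hb with h | h <;> subst h <;>
    simp [show ('C' : Char) ≠ 'V' from by decide, show ('V' : Char) ≠ 'C' from by decide] <;>
    tauto

lemma pvALoop_gt {rest : List Char} {t : Bool} {cpt : Int} (h : ¬ cpt ≤ 3) :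
    pvALoop rest t cpt = cpt := by
  cases rest <;> simp [pvALoop, h]

-- main invariant for A's loop: its running value stays ≤ 3 iff no run of four
-- occurs in the transformed string and the current run cannot grow past 3
lemma pvALoop_le_iff (cs : List Char) :
    ∀ (consonne : Bool) (cpt : Int), 0 ≤ cpt → cpt ≤ 3 →
    (pvALoop cs consonne cpt ≤ 3 ↔
      (¬ Run4 (cs.map pvTyp) ∧
        (((cs.map pvTyp).takeWhile (fun x => x == cond consonne 'C' 'V')).length : Int) ≤ 3 - cpt)) := by
  induction cs with
  | nil =>
      intro consonne cpt h0 h3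
      simp [pvALoop, Run4, h3]
  | cons c rest ih =>
      intro consonne cpt h0 h3
      by_cases hv : PySem.Chars.isIn [c] "aeiouy".toList = true <;>
        cases consonne <;>
        simp only [pvALoop, pvTyp, hv, h3, List.map_cons, if_true, if_false,
          Bool.false_eq_true, Bool.cond_false, Bool.cond_true]
      · -- vowel seen, current vowel run grows
        by_cases hlt : cpt + 1 ≤ 3
        · rw [ih false (cpt + 1) (by omega) hlt]
          simp only [Bool.cond_false]
          rw [run4_cons (Or.inl rfl), tw_cons, if_pos rfl]
          simp only [List.length_cons, Nat.cast_add, Nat.cast_one]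
          constructor
          · rintro ⟨h1, h2⟩
            refine ⟨fun h => ?_, by omega⟩
            rcases h with h | h
            · exact h1 h
            · omega
          · rintro ⟨h1, h2⟩
            exact ⟨fun h => h1 (Or.inl h), by omega⟩
        · rw [pvALoop_gt (by omega), tw_cons, if_pos rfl]
          simp only [List.length_cons, Nat.cast_add, Nat.cast_one]
          constructor
          · intro h
            exact absurd h hlt
          · rintro ⟨-, h2⟩
            omega
      · -- vowel seen, current run is consonants: a new vowel run of length 1
        rw [ih false 1 (by omega) (by omega)]
        simp only [Bool.cond_false]
        rw [run4_cons (Or.inl rfl), tw_cons, if_neg (by decide)]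
        simp only [List.length_nil, Nat.cast_zero]
        constructor
        · rintro ⟨h1, h2⟩
          refine ⟨fun h => ?_, by omega⟩
          rcases h with h | h
          · exact h1 h
          · omega
        · rintro ⟨h1, -⟩
          refine ⟨fun h => h1 (Or.inl h), ?_⟩
          by_contra hgt
          exact h1 (Or.inr (by omega))
      · -- consonant seen, current run is vowels: a new consonant run of length 1
        rw [ih true 1 (by omega) (by omega)]
        simp only [Bool.cond_true]
        rw [run4_cons (Or.inr rfl), tw_cons, if_neg (by decide)]
        simp only [List.length_nil, Nat.cast_zero]
        constructor
        · rintro ⟨h1, h2⟩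
          refine ⟨fun h => ?_, by omega⟩
          rcases h with h | h
          · exact h1 h
          · omega
        · rintro ⟨h1, -⟩
          refine ⟨fun h => h1 (Or.inl h), ?_⟩
          by_contra hgt
          exact h1 (Or.inr (by omega))
      · -- consonant seen, current consonant run grows
        by_cases hlt : cpt + 1 ≤ 3
        · rw [ih true (cpt + 1) (by omega) hlt]
          simp only [Bool.cond_true]
          rw [run4_cons (Or.inr rfl), tw_cons, if_pos rfl]
          simp only [List.length_cons, Nat.cast_add, Nat.cast_one]
          constructor
          · rintro ⟨h1, h2⟩
            refine ⟨fun h => ?_, by omega⟩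
            rcases h with h | h
            · exact h1 h
            · omega
          · rintro ⟨h1, h2⟩
            exact ⟨fun h => h1 (Or.inl h), by omega⟩
        · rw [pvALoop_gt (by omega), tw_cons, if_pos rfl]
          simp only [List.length_cons, Nat.cast_add, Nat.cast_one]
          constructor
          · intro h
            exact absurd h hlt
          · rintro ⟨-, h2⟩
            omega

-- ===== VERDICT =====
theorem prononocable_spec : Claim_equal_prononocable := by
  intro mot _
  simp only [Spec_prononocable, prononocable, prononocable_alt]
  have h := pvALoop_le_iff mot.toList true 0 (by omega) (by omega)
  simp only [Bool.cond_true] at h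
  rw [Bool.eq_iff_iff]
  simp only [Bool.and_eq_true, Bool.not_eq_true', decide_eq_true_eq]
  rw [h, PySem.Chars.isIn_eq_false_iff, PySem.Chars.isIn_eq_false_iff,
      show "VVVV".toList = List.replicate 4 'V' from by decide,
      show "CCCC".toList = List.replicate 4 'C' from by decide]
  unfold Run4
  constructor
  · rintro ⟨h1, -⟩
    exact ⟨fun hx => h1 (Or.inl hx), fun hx => h1 (Or.inr hx)⟩
  · rintro ⟨h1, h2⟩
    refine ⟨fun hx => hx.elim h1 h2, ?_⟩
    by_contra hgt
    have h4 : (4 : Nat) ≤ ((mot.toList.map pvTyp).takeWhile (fun x => x == 'C')).length := by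
      omega
    exact h2 ((replicate_prefix_iff_takeWhile 4).mpr h4).isInfix
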